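-- pv_equiv track=rewrite | github.com/DurkDiggler/HQSec-SOCAI | src/soc_agent/ai/threat_analyzer.py | _identify_target_type
-- ===== SOURCE A (Python) =====
-- from typing import Any, Dict, List, Optional
--
-- def _identify_target_type(target_info: Dict[str, Any]) -> str:
--     """Identify target type for appropriate tool selection."""
--     ip = target_info.get("ip", "")
--     ports = target_info.get("ports", [])
--     services = target_info.get("services", [])
--
--     # Check for web services
--     web_ports = [80, 443, 8080, 8443, 8000, 3000]
--     if any(port in web_ports for port in ports):
--         return "web_application"
--
--     # Check for database services
--     db_ports = [3306, 5432, 1433, 1521, 27017]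
--     if any(port in db_ports for port in ports):
--         return "database"
--
--     # Check for authentication services
--     auth_ports = [22, 23, 21, 25, 110, 143]
--     if any(port in auth_ports for port in ports):
--         return "authentication"
--
--     return "network"
-- ===== SOURCE B (Python) =====
-- _PORT_CATEGORY = {
--     80: "web_application", 443: "web_application", 8080: "web_application",
--     8443: "web_application", 8000: "web_application", 3000: "web_application",
--     3306: "database", 5432: "database", 1433: "database", 1521: "database",
--     27017: "database",
--     22: "authentication", 23: "authentication", 21: "authentication",
--     25: "authentication", 110: "authentication", 143: "authentication",
-- }
--
-- _PRIORITY = ["web_application", "database", "authentication"]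
--
-- def _identify_target_type(target_info):
--     """Identify target type for appropriate tool selection."""
--     ports = target_info.get("ports", [])
--     found = set()
--     for port in ports:
--         cat = _PORT_CATEGORY.get(port)
--         if cat is not None:
--             found.add(cat)
--     for cat in _PRIORITY:
--         if cat in found:
--             return cat
--     return "network"
-- ===== Notes on version B (the rewrite author's own statement) =====
-- stated objective: idiomatic
-- what changed: Replaces three sequential any()-membership scans over three port lists by one pass over ports that classifies each port via a single port-to-category lookup table into a set, followed by one priority-ordered check of the three category names.
import Mathlib
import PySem

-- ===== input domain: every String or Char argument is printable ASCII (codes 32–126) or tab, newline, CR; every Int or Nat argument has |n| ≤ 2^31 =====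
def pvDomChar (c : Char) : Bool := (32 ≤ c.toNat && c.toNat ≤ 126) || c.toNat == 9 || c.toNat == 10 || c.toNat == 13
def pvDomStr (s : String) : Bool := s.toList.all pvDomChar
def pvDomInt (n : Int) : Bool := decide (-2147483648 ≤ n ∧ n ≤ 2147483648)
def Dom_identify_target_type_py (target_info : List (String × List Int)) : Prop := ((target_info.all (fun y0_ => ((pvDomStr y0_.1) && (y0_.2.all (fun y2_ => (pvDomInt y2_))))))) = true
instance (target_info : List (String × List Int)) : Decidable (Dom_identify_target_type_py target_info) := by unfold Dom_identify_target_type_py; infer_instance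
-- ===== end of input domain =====

-- B replaces A's three sequential membership scans by one table-classifying pass plus a priority-ordered check (idiomatic).
-- ===== PORT A =====
-- 'ip' and 'services' are read by A but never used and are not representable in the String → List Int dict; omitted.
def identify_target_type_py (target_info : List (String × List Int)) : String :=
  let ports := (PySem.Dict.mk target_info).getD "ports" []
  let web_ports : List Int := [80, 443, 8080, 8443, 8000, 3000]
  if ports.any (fun port => web_ports.contains port) then "web_application"
  else
    let db_ports : List Int := [3306, 5432, 1433, 1521, 27017]
    if ports.any (fun port => db_ports.contains port) then "database"
    else
      let auth_ports : List Int := [22, 23, 21, 25, 110, 143]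
      if ports.any (fun port => auth_ports.contains port) then "authentication"
      else "network"

-- ===== PORT B =====
def pvPortCategory : List (Int × String) :=
  [(80, "web_application"), (443, "web_application"), (8080, "web_application"),
   (8443, "web_application"), (8000, "web_application"), (3000, "web_application"),
   (3306, "database"), (5432, "database"), (1433, "database"), (1521, "database"),
   (27017, "database"),
   (22, "authentication"), (23, "authentication"), (21, "authentication"),
   (25, "authentication"), (110, "authentication"), (143, "authentication")]

def pvPriority : List String := ["web_application", "database", "authentication"]

def identify_target_type_py_alt (target_info : List (String × List Int)) : String :=
  let ports := (PySem.Dict.mk target_info).getD "ports" []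
  let found : PySem.Set String := ports.foldl
    (fun s port =>
      match (PySem.Dict.mk pvPortCategory).get? port with
      | some cat => PySem.Set.add s cat
      | none => s)
    PySem.Set.empty
  match pvPriority.find? (fun cat => PySem.Set.contains found cat) with
  | some cat => cat
  | none => "network"

-- ===== PRECONDITION & SPEC =====
def Spec_identify_target_type_py (target_info : List (String × List Int)) (out : String) : Prop := out = identify_target_type_py_alt target_info
instance (target_info : List (String × List Int)) (out : String) : Decidable (Spec_identify_target_type_py target_info out) := by unfold Spec_identify_target_type_py; infer_instance

-- ===== CLAIM (what is proved, stated in full; the proofs are below) =====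
def Claim_equal_identify_target_type_py : Prop := ∀ (target_info : List (String × List Int)), Dom_identify_target_type_py target_info → Spec_identify_target_type_py target_info (identify_target_type_py target_info)

-- ===== LEMMAS AND PROOFS =====

-- membership in the category set built by B's fold
lemma mem_found (c : String) (ports : List Int) (s : List String) :
    (c ∈ ports.foldl
      (fun s port =>
        match (PySem.Dict.mk pvPortCategory).get? port with
        | some cat => PySem.Set.add s cat
        | none => s) s)
    ↔ (c ∈ s ∨ ∃ p ∈ ports, (PySem.Dict.mk pvPortCategory).get? p = some c) := by
  induction ports generalizing s with
  | nil => simp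
  | cons p ps ih =>
    simp only [List.foldl_cons]
    cases h : (PySem.Dict.mk pvPortCategory).get? p with
    | none =>
      rw [ih]
      simp only [List.mem_cons]
      constructor
      · rintro (hs | ⟨q, hq, hc⟩)
        · exact Or.inl hs
        · exact Or.inr ⟨q, Or.inr hq, hc⟩
      · rintro (hs | ⟨q, (rfl | hq), hc⟩)
        · exact Or.inl hs
        · rw [h] at hc; cases hc
        · exact Or.inr ⟨q, hq, hc⟩
    | some cat =>
      rw [ih]
      simp only [PySem.Set.mem_add, List.mem_cons]
      constructor
      · rintro ((hs | rfl) | ⟨q, hq, hc⟩)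
        · exact Or.inl hs
        · exact Or.inr ⟨p, Or.inl rfl, h⟩
        · exact Or.inr ⟨q, Or.inr hq, hc⟩
      · rintro (hs | ⟨q, (rfl | hq), hc⟩)
        · exact Or.inl (Or.inl hs)
        · rw [h] at hc; exact Or.inl (Or.inr (Option.some.inj hc).symm)
        · exact Or.inr ⟨q, hq, hc⟩

-- what the port-to-category table answers, per category
lemma get_web (p : Int) :
    (PySem.Dict.mk pvPortCategory).get? p = some "web_application" ↔
      p ∈ ([80, 443, 8080, 8443, 8000, 3000] : List Int) := by
  rcases eq_or_ne p 80 with rfl | h1; · decide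
  rcases eq_or_ne p 443 with rfl | h2; · decide
  rcases eq_or_ne p 8080 with rfl | h3; · decide
  rcases eq_or_ne p 8443 with rfl | h4; · decide
  rcases eq_or_ne p 8000 with rfl | h5; · decide
  rcases eq_or_ne p 3000 with rfl | h6; · decide
  rcases eq_or_ne p 3306 with rfl | h7; · decide
  rcases eq_or_ne p 5432 with rfl | h8; · decide
  rcases eq_or_ne p 1433 with rfl | h9; · decide
  rcases eq_or_ne p 1521 with rfl | h10; · decide
  rcases eq_or_ne p 27017 with rfl | h11; · decide
  rcases eq_or_ne p 22 with rfl | h12; · decide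
  rcases eq_or_ne p 23 with rfl | h13; · decide
  rcases eq_or_ne p 21 with rfl | h14; · decide
  rcases eq_or_ne p 25 with rfl | h15; · decide
  rcases eq_or_ne p 110 with rfl | h16; · decide
  rcases eq_or_ne p 143 with rfl | h17; · decide
  simp [pysem, PySem.Dict.get?, pvPortCategory, Ne.symm h1, Ne.symm h2, Ne.symm h3,
        Ne.symm h4, Ne.symm h5, Ne.symm h6, Ne.symm h7, Ne.symm h8, Ne.symm h9,
        Ne.symm h10, Ne.symm h11, Ne.symm h12, Ne.symm h13, Ne.symm h14, Ne.symm h15,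
        Ne.symm h16, Ne.symm h17]
  omega

lemma get_db (p : Int) :
    (PySem.Dict.mk pvPortCategory).get? p = some "database" ↔
      p ∈ ([3306, 5432, 1433, 1521, 27017] : List Int) := by
  rcases eq_or_ne p 80 with rfl | h1; · decide
  rcases eq_or_ne p 443 with rfl | h2; · decide
  rcases eq_or_ne p 8080 with rfl | h3; · decide
  rcases eq_or_ne p 8443 with rfl | h4; · decide
  rcases eq_or_ne p 8000 with rfl | h5; · decide
  rcases eq_or_ne p 3000 with rfl | h6; · decide
  rcases eq_or_ne p 3306 with rfl | h7; · decide
  rcases eq_or_ne p 5432 with rfl | h8; · decide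
  rcases eq_or_ne p 1433 with rfl | h9; · decide
  rcases eq_or_ne p 1521 with rfl | h10; · decide
  rcases eq_or_ne p 27017 with rfl | h11; · decide
  rcases eq_or_ne p 22 with rfl | h12; · decide
  rcases eq_or_ne p 23 with rfl | h13; · decide
  rcases eq_or_ne p 21 with rfl | h14; · decide
  rcases eq_or_ne p 25 with rfl | h15; · decide
  rcases eq_or_ne p 110 with rfl | h16; · decide
  rcases eq_or_ne p 143 with rfl | h17; · decide
  simp [pysem, PySem.Dict.get?, pvPortCategory, Ne.symm h1, Ne.symm h2, Ne.symm h3,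
        Ne.symm h4, Ne.symm h5, Ne.symm h6, Ne.symm h7, Ne.symm h8, Ne.symm h9,
        Ne.symm h10, Ne.symm h11, Ne.symm h12, Ne.symm h13, Ne.symm h14, Ne.symm h15,
        Ne.symm h16, Ne.symm h17]
  omega

lemma get_auth (p : Int) :
    (PySem.Dict.mk pvPortCategory).get? p = some "authentication" ↔
      p ∈ ([22, 23, 21, 25, 110, 143] : List Int) := by
  rcases eq_or_ne p 80 with rfl | h1; · decide
  rcases eq_or_ne p 443 with rfl | h2; · decide
  rcases eq_or_ne p 8080 with rfl | h3; · decide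
  rcases eq_or_ne p 8443 with rfl | h4; · decide
  rcases eq_or_ne p 8000 with rfl | h5; · decide
  rcases eq_or_ne p 3000 with rfl | h6; · decide
  rcases eq_or_ne p 3306 with rfl | h7; · decide
  rcases eq_or_ne p 5432 with rfl | h8; · decide
  rcases eq_or_ne p 1433 with rfl | h9; · decide
  rcases eq_or_ne p 1521 with rfl | h10; · decide
  rcases eq_or_ne p 27017 with rfl | h11; · decide
  rcases eq_or_ne p 22 with rfl | h12; · decide
  rcases eq_or_ne p 23 with rfl | h13; · decide
  rcases eq_or_ne p 21 with rfl | h14; · decide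
  rcases eq_or_ne p 25 with rfl | h15; · decide
  rcases eq_or_ne p 110 with rfl | h16; · decide
  rcases eq_or_ne p 143 with rfl | h17; · decide
  simp [pysem, PySem.Dict.get?, pvPortCategory, Ne.symm h1, Ne.symm h2, Ne.symm h3,
        Ne.symm h4, Ne.symm h5, Ne.symm h6, Ne.symm h7, Ne.symm h8, Ne.symm h9,
        Ne.symm h10, Ne.symm h11, Ne.symm h12, Ne.symm h13, Ne.symm h14, Ne.symm h15,
        Ne.symm h16, Ne.symm h17]
  omega

-- ===== VERDICT (by name: the statement is the Claim_ definition above) =====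
theorem identify_target_type_py_spec : Claim_equal_identify_target_type_py := by
  intro target_info _
  simp only [Spec_identify_target_type_py, identify_target_type_py, identify_target_type_py_alt]
  set ports := (PySem.Dict.mk target_info).getD "ports" [] with hports
  set F := List.foldl
      (fun s port =>
        match (PySem.Dict.mk pvPortCategory).get? port with
        | some cat => PySem.Set.add s cat
        | none => s) PySem.Set.empty ports with hF
  have hmem : ∀ c : String, PySem.Set.contains F c = true ↔
      ∃ p ∈ ports, (PySem.Dict.mk pvPortCategory).get? p = some c := by
    intro c
    have h := mem_found c ports PySem.Set.empty
    simp only [PySem.Set.empty, List.not_mem_nil, false_or] at h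
    rw [hF]
    simpa [PySem.Set.contains, List.contains_iff_mem] using h
  have key : ∀ (c : String) (lst : List Int),
      (∀ p : Int, (PySem.Dict.mk pvPortCategory).get? p = some c ↔ p ∈ lst) →
      PySem.Set.contains F c = ports.any (fun port => lst.contains port) := by
    intro c lst hc
    rw [Bool.eq_iff_iff, hmem c]
    simp only [List.any_eq_true, List.contains_iff_mem]
    constructor
    · rintro ⟨p, hp, hsome⟩; exact ⟨p, hp, (hc p).mp hsome⟩
    · rintro ⟨p, hp, hin⟩; exact ⟨p, hp, (hc p).mpr hin⟩
  have hW := key "web_application" [80, 443, 8080, 8443, 8000, 3000] get_web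
  have hD := key "database" [3306, 5432, 1433, 1521, 27017] get_db
  have hA := key "authentication" [22, 23, 21, 25, 110, 143] get_auth
  simp only [pvPriority, List.find?]
  rw [hW, hD, hA]
  cases hw : ports.any (fun port => ([80, 443, 8080, 8443, 8000, 3000] : List Int).contains port) <;>
    cases hd : ports.any (fun port => ([3306, 5432, 1433, 1521, 27017] : List Int).contains port) <;>
      cases ha : ports.any (fun port => ([22, 23, 21, 25, 110, 143] : List Int).contains port) <;>
        rfl
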